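-- pv_equiv track=rewrite | github.com/dezgeg/linux | tools/lkl/python/cptofs.py | match_root
-- ===== SOURCE A (Python) =====
-- def match_root(src):
--     for i in range(len(src)):
--         if src[i] == '.':
--             if i > 0 and src[i - 1] == '.':
--                 return 0
--         elif src[i] != '/':
--             return 0
--
--     return 1
-- ===== SOURCE B (Python) =====
-- import re
--
-- _ROOT_RE = re.compile(r'(?!.*\.\.)[./]*')
--
-- def match_root(src):
--     return 1 if _ROOT_RE.fullmatch(src) else 0
-- ===== Notes on version B (the rewrite author's own statement) =====
-- stated objective: idiomatic
-- what changed: Replaced the index loop with look-behind checks by a single precompiled regex fullmatch ([./]* with a negative lookahead for '..') returning 1/0.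
import Mathlib
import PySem

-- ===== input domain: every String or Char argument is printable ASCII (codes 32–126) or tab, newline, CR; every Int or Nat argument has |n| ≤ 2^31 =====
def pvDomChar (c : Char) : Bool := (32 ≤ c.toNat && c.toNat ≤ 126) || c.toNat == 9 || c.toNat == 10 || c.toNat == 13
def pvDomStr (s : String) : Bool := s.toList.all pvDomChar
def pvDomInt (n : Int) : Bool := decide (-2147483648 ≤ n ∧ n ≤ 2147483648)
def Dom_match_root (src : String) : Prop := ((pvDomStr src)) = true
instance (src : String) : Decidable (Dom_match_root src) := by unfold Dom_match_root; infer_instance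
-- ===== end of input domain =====

-- B replaces A's index loop (with a look-behind check) by a single regex-style check:
-- all characters are '.' or '/' and no ".." occurs; objective: idiomatic.


-- ===== PORT A =====
-- the 'for i in range(len(src))' loop; early 'return 0' is the 0 branches
def matchRootGo (cs : List Char) (i : Nat) : Int :=
  if _h : i < cs.length then
    if cs.getD i ' ' = '.' then
      if i > 0 ∧ cs.getD (i - 1) ' ' = '.' then 0
      else matchRootGo cs (i + 1)
    else if cs.getD i ' ' ≠ '/' then 0
    else matchRootGo cs (i + 1)
  else 1
termination_by cs.length - i

def match_root (src : String) : Int := matchRootGo src.toList 0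

-- ===== PORT B =====
-- the negative lookahead (?!.*\.\.): does ".." occur anywhere?
def hasDotDot : List Char → Bool
  | [] => false
  | [_] => false
  | a :: b :: t => (a == '.' && b == '.') || hasDotDot (b :: t)

-- re.fullmatch(r'(?!.*\.\.)[./]*', src): every char is '.' or '/', and no ".."
def match_root_alt (src : String) : Int :=
  if (src.toList.all fun c => c == '.' || c == '/') && !hasDotDot src.toList then 1 else 0

-- ===== PRECONDITION & SPEC =====
def Spec_match_root (src : String) (out : Int) : Prop := out = match_root_alt src
instance (src : String) (out : Int) : Decidable (Spec_match_root src out) := by unfold Spec_match_root; infer_instance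

-- ===== CLAIM (what is proved, stated in full; the proofs are below) =====
def Claim_equal_match_root : Prop := ∀ (src : String), Dom_match_root src → Spec_match_root src (match_root src)

-- ===== LEMMAS AND PROOFS =====

-- state of A's loop as a function of the suffix and whether the previous char was '.'
def goB (prevDot : Bool) : List Char → Bool
  | [] => true
  | c :: t =>
      if c = '.' then !prevDot && goB true t
      else c == '/' && goB false t

theorem drop_cons_getD (cs : List Char) (i : Nat) (h : i < cs.length) :
    cs.drop i = cs.getD i ' ' :: cs.drop (i + 1) := by
  rw [List.getD_eq_getElem?_getD, List.getElem?_eq_getElem h]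
  simp

set_option maxRecDepth 2048 in
theorem matchRootGo_eq (cs : List Char) (i : Nat) :
    matchRootGo cs i =
      if goB (decide (i > 0 ∧ cs.getD (i - 1) ' ' = '.')) (cs.drop i) then 1 else 0 := by
  induction i using matchRootGo.induct cs with
  | case1 i h hdot hprev =>
      have hp : decide (i > 0 ∧ cs.getD (i - 1) ' ' = '.') = true := decide_eq_true hprev
      rw [matchRootGo, dif_pos h, if_pos hdot, if_pos hprev,
        drop_cons_getD cs i h, hdot, hp]
      simp [goB]
  | case2 i h hdot hprev ih =>
      have h1 : decide (i + 1 > 0 ∧ cs.getD (i + 1 - 1) ' ' = '.') = true := by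
        rw [Nat.add_sub_cancel]; exact decide_eq_true ⟨Nat.succ_pos i, hdot⟩
      have hp : decide (i > 0 ∧ cs.getD (i - 1) ' ' = '.') = false := decide_eq_false hprev
      rw [matchRootGo, dif_pos h, if_pos hdot, if_neg hprev, ih,
        drop_cons_getD cs i h, hdot, h1, hp]
      simp [goB]
  | case3 i h hdot hslash =>
      have h1 : (cs.getD i ' ' == '/') = false := by simpa using hslash
      rw [matchRootGo, dif_pos h, if_neg hdot, if_pos hslash, drop_cons_getD cs i h]
      simp only [goB, if_neg hdot, h1, Bool.false_and]
      simp
  | case4 i h hdot hslash ih =>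
      have hsl : cs.getD i ' ' = '/' := by by_contra hc; exact hslash hc
      have h1 : decide (i + 1 > 0 ∧ cs.getD (i + 1 - 1) ' ' = '.') = false := by
        rw [Nat.add_sub_cancel]; exact decide_eq_false (fun hx => hdot hx.2)
      rw [matchRootGo, dif_pos h, if_neg hdot, if_neg hslash, ih,
        drop_cons_getD cs i h, hsl, h1]
      simp [goB]
  | case5 i h =>
      rw [matchRootGo]
      simp [h, goB, List.drop_eq_nil_of_le (Nat.le_of_not_lt h)]

theorem hasDotDot_cons (c : Char) (t : List Char) :
    hasDotDot (c :: t) = ((c == '.') && (t.headD '/' == '.') || hasDotDot t) := by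
  cases t with
  | nil => simp [hasDotDot]
  | cons d t' => simp [hasDotDot]

theorem goB_eq (prevDot : Bool) (l : List Char) :
    goB prevDot l =
      ((l.all fun c => c == '.' || c == '/') && !hasDotDot l
        && !(prevDot && (l.headD '/' == '.'))) := by
  induction l generalizing prevDot with
  | nil => simp [goB, hasDotDot]
  | cons c t ih =>
      rw [hasDotDot_cons]
      by_cases hc : c = '.'
      · subst hc
        simp only [goB, ih]
        cases prevDot <;> cases hA : t.all (fun c => c == '.' || c == '/') <;>
          cases hH : hasDotDot t <;> cases hh : (t.headD '/' == '.') <;> simp_all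
      · have hc' : (c == '.') = false := by simpa using hc
        simp only [goB, if_neg hc, ih, hc']
        by_cases hs : c = '/'
        · subst hs
          cases hA : t.all (fun c => c == '.' || c == '/') <;>
            cases hH : hasDotDot t <;> simp_all
        · have hs' : (c == '/') = false := by simpa using hs
          simp [hs', hc']

-- ===== VERDICT (by name: the statement is the Claim_ definition above) =====
theorem match_root_spec : Claim_equal_match_root := by
  intro src _
  show match_root src = match_root_alt src
  rw [match_root, matchRootGo_eq, match_root_alt]
  simp [goB_eq]
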